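-- pv_equiv track=rewrite | github.com/copperlight/hots-analysis | jhow-tierlist/tier-list-frequency.py | build_tier_list
-- ===== SOURCE A (Python) =====
-- def build_tier_list(histogram):
--     tier_list = {}
--
--     for hero in histogram:
--         rank = []
--
--         for k, v in histogram[hero].items():
--             rank.append((k, v))
--
--         rank.sort(key=lambda x: x[1], reverse=True)
--
--         tier, votes = rank[0][0], rank[0][1]
--
--         if tier not in tier_list:
--             tier_list[tier] = [f'{hero} ({votes})']
--         else:
--             tier_list[tier].append(f'{hero} ({votes})')
--
--     tier_list = {k: tier_list[k] for k in sorted(tier_list)}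
--
--     for tier in tier_list:
--         tier_list[tier].sort()
--
--     return tier_list
-- ===== SOURCE B (Python) =====
-- def build_tier_list(histogram):
--     # one global sort of (tier, label) pairs replaces A's bucket dict + key sort + per-tier sorts
--     pairs = sorted(
--         (top[0], f'{hero} ({top[1]})')
--         for hero, tiers in histogram.items()
--         for top in [sorted(tiers.items(), key=lambda kv: kv[1], reverse=True)[0]]
--     )
--     result = {}
--     i = 0
--     n = len(pairs)
--     while i < n:
--         tier = pairs[i][0]
--         labels = []
--         j = i
--         while j < n and pairs[j][0] == tier:
--             labels.append(pairs[j][1])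
--             j += 1
--         result[tier] = labels
--         i = j
--     return result
-- ===== Notes on version B (the rewrite author's own statement) =====
-- stated objective: alternative
-- what changed: A buckets each hero's top tier into a dict with a membership branch, then rebuilds the dict with sorted keys and sorts every tier's label list separately; B collects flat (tier, label) pairs, sorts them once globally, and emits the groups by scanning consecutive runs of equal tiers, so one sort yields both the key order and each tier's label order.
import Mathlib
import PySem

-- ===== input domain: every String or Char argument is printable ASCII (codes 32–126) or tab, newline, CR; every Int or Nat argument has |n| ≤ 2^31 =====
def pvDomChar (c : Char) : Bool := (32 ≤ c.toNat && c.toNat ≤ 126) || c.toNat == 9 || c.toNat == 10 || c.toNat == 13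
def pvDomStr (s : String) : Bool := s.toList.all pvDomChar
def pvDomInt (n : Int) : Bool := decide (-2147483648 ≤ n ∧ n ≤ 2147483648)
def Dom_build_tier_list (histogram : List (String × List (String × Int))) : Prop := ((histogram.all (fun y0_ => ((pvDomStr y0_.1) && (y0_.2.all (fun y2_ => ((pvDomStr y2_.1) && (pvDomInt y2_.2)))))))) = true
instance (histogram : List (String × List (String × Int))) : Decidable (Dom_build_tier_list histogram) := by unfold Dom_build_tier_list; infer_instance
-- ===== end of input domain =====

-- B replaces A's bucket dict + key sort + per-tier label sorts by one global sort of
-- (tier, label) pairs followed by a scan over consecutive equal-tier runs (objective: alternative).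

-- ===== PORT A =====
-- the Python dict arguments are decoded from the association lists by the convention
-- "lookup = first match": the first occurrence of a key wins (a setdefault fold)
def pvDictDecode {α β : Type} [BEq α] (l : List (α × β)) : PySem.Dict α β :=
  l.foldl (fun d p => d.setdefault p.1 p.2) PySem.Dict.empty

def build_tier_list (histogram : List (String × List (String × Int))) : List (String × List String) :=
  let tl0 : PySem.Dict String (List String) :=
    (pvDictDecode histogram).items.foldl (fun tier_list hhv =>
      let rank0 : List (String × Int) :=
        (pvDictDecode hhv.2).items.foldl (fun rank kv => rank ++ [kv]) []
      match PySem.List.sorted rank0 (fun x => x.2) true with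
      | [] => tier_list   -- Python raises IndexError here (rank[0]); excluded by Pre_
      | (tier, votes) :: _ =>
        if tier_list.contains tier then
          tier_list.modify tier [] (fun l => l ++ [hhv.1 ++ " (" ++ PySem.Int.toStr votes ++ ")"])
        else
          tier_list.insert tier [hhv.1 ++ " (" ++ PySem.Int.toStr votes ++ ")"]) PySem.Dict.empty
  let tl1 : PySem.Dict String (List String) :=
    (PySem.List.sorted tl0.keys (fun k => k) false).foldl
      (fun d k => d.insert k (tl0.getD k [])) PySem.Dict.empty
  let tl2 : PySem.Dict String (List String) :=
    tl1.keys.foldl (fun d tier => d.modify tier [] (fun l => PySem.List.sorted l (fun x => x) false)) tl1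
  tl2.items

-- ===== PORT B =====
-- the outer while loop of Source B: emit one (tier, labels) group per run of equal tiers;
-- the inner while loop collecting a run is the takeWhile/dropWhile split of the remainder
def pvGroupRuns : List (String × String) → List (String × List String)
  | [] => []
  | (t, l) :: rest =>
      (t, l :: (rest.takeWhile (fun q => q.1 == t)).map (fun q => q.2)) ::
        pvGroupRuns (rest.dropWhile (fun q => q.1 == t))
termination_by s => s.length
decreasing_by
  have := List.length_dropWhile_le (fun q : String × String => q.1 == t) rest
  simp; omega

def build_tier_list_alt (histogram : List (String × List (String × Int))) : List (String × List String) :=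
  let pairs : List (String × String) :=
    (pvDictDecode histogram).items.foldl (fun acc hhv =>
      match PySem.List.sorted (pvDictDecode hhv.2).items (fun kv => kv.2) true with
      | [] => acc   -- Python raises IndexError here ([0]); excluded by Pre_
      | top :: _ => acc ++ [(top.1, hhv.1 ++ " (" ++ PySem.Int.toStr top.2 ++ ")")]) []
  pvGroupRuns (PySem.List.sorted2 pairs (fun p => p.1) (fun p => p.2) false)

-- ===== PRECONDITION & SPEC =====
-- Both Pythons raise IndexError (rank[0] / [0]) exactly when some hero's inner dict is empty;
-- Pre_ excludes the lists with an empty inner list and nothing else.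
def Pre_build_tier_list (histogram : List (String × List (String × Int))) : Prop :=
  ∀ p ∈ histogram, p.2 ≠ []
instance (histogram : List (String × List (String × Int))) : Decidable (Pre_build_tier_list histogram) := by unfold Pre_build_tier_list; infer_instance
def pvWitness_build_tier_list : (List (String × List (String × Int))) :=
  [("Valla", [("S", 3), ("A", 3)]), ("Abathur", [("B", -1)])]
def Spec_build_tier_list (histogram : List (String × List (String × Int))) (out : List (String × List String)) : Prop := out = build_tier_list_alt histogram
instance (histogram : List (String × List (String × Int))) (out : List (String × List String)) : Decidable (Spec_build_tier_list histogram out) := by unfold Spec_build_tier_list; infer_instance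

-- ===== CLAIM (what is proved, stated in full; the proofs are below) =====
def Claim_equal_build_tier_list : Prop := ∀ (histogram : List (String × List (String × Int))), Dom_build_tier_list histogram → Pre_build_tier_list histogram → Spec_build_tier_list histogram (build_tier_list histogram)

-- ===== LEMMAS AND PROOFS =====

-- the (tier, label) pair a hero contributes ([] when its inner dict is empty)
def pvPairFn (hhv : String × List (String × Int)) : List (String × String) :=
  match PySem.List.sorted (pvDictDecode hhv.2).items (fun x => x.2) true with
  | [] => []
  | top :: _ => [(top.1, hhv.1 ++ " (" ++ PySem.Int.toStr top.2 ++ ")")]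

def pvPairs (histogram : List (String × List (String × Int))) : List (String × String) :=
  (pvDictDecode histogram).items.flatMap pvPairFn

def pvBucket (t : String) (ps : List (String × String)) : List String :=
  (ps.filter (fun p => p.1 == t)).map (fun x => x.2)

-- the common normal form both programs compute
def pvSpec (ps : List (String × String)) : List (String × List String) :=
  (PySem.List.sorted (PySem.Set.ofList (ps.map (fun p => p.1))) (fun t => t) false).map
    (fun t => (t, PySem.List.sorted (pvBucket t ps) (fun x => x) false))

def pvLexLE (a b : String × String) : Prop := a.1 < b.1 ∨ (a.1 = b.1 ∧ a.2 ≤ b.2)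
def pvLexLT (a b : String × String) : Bool :=
  decide (a.1 < b.1) || !decide (b.1 < a.1) && decide (a.2 < b.2)

theorem pvA_fold (items : List (String × List (String × Int)))
    (d : PySem.Dict String (List String)) :
    items.foldl (fun tier_list hhv =>
      let rank0 : List (String × Int) :=
        (pvDictDecode hhv.2).items.foldl (fun rank kv => rank ++ [kv]) []
      match PySem.List.sorted rank0 (fun x => x.2) true with
      | [] => tier_list
      | (tier, votes) :: _ =>
        if tier_list.contains tier then
          tier_list.modify tier [] (fun l => l ++ [hhv.1 ++ " (" ++ PySem.Int.toStr votes ++ ")"])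
        else
          tier_list.insert tier [hhv.1 ++ " (" ++ PySem.Int.toStr votes ++ ")"]) d
    = (items.flatMap pvPairFn).foldl (fun d p => d.modify p.1 [] (fun l => l ++ [p.2])) d := by
  induction items generalizing d with
  | nil => rfl
  | cons hhv rest ih =>
    rw [List.foldl_cons, List.flatMap_cons, List.foldl_append, ih]
    congr 1
    simp only [PySem.List.foldl_append_singleton_eq_self, List.nil_append]
    unfold pvPairFn
    cases h : PySem.List.sorted (pvDictDecode hhv.2).items (fun x => x.2) true with
    | nil => rfl
    | cons top tl =>
      obtain ⟨tier, votes⟩ := top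
      simp only [List.foldl_cons, List.foldl_nil]
      by_cases hc : d.contains tier = true
      · simp only [hc, if_true, PySem.Dict.modify]
      · simp only [Bool.not_eq_true] at hc
        simp only [hc, if_false, PySem.Dict.modify, PySem.Dict.getD_of_not_contains d _ hc,
          List.nil_append, Bool.false_eq_true, if_false]

-- the three stages of A's pipeline, over the flat pair list
def pvT0 (ps : List (String × String)) : PySem.Dict String (List String) :=
  ps.foldl (fun d p => d.modify p.1 [] (fun l => l ++ [p.2])) PySem.Dict.empty
def pvT1 (ps : List (String × String)) : PySem.Dict String (List String) :=
  (PySem.List.sorted (pvT0 ps).keys (fun k => k) false).foldl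
    (fun d k => d.insert k ((pvT0 ps).getD k [])) PySem.Dict.empty
def pvT2 (ps : List (String × String)) : PySem.Dict String (List String) :=
  (pvT1 ps).keys.foldl
    (fun d tier => d.modify tier [] (fun l => PySem.List.sorted l (fun x => x) false)) (pvT1 ps)

theorem pvG_getD (ks : List String) (d : PySem.Dict String (List String)) (hnd : ks.Nodup) (t : String) :
    (ks.foldl (fun d k => d.modify k [] (fun l => PySem.List.sorted l (fun x => x) false)) d).getD t []
      = if t ∈ ks then PySem.List.sorted (d.getD t []) (fun x => x) false else d.getD t [] := by
  induction ks generalizing d with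
  | nil => simp
  | cons k ks ih =>
    simp only [List.foldl_cons]
    rw [ih _ (List.Nodup.of_cons hnd)]
    by_cases ht : t ∈ ks
    · have htk : t ≠ k := by rintro rfl; exact (List.nodup_cons.mp hnd).1 ht
      rw [PySem.Dict.getD_modify]
      simp [ht, htk]
    · by_cases htk : t = k
      · subst htk; rw [PySem.Dict.getD_modify]; simp [ht]
      · rw [PySem.Dict.getD_modify]; simp [ht, htk]

theorem pvT0_keys (ps : List (String × String)) :
    (pvT0 ps).keys = PySem.Set.ofList (ps.map (fun p => p.1)) := by
  unfold pvT0
  rw [PySem.Dict.keys_foldl_modify_key ps (fun p => p.1) [] (fun _ p l => l ++ [p.2])]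
  rw [PySem.Dict.keys_empty, PySem.Set.update_nil_left]

theorem pvT0_getD (ps : List (String × String)) (t : String) :
    (pvT0 ps).getD t [] = pvBucket t ps := by
  unfold pvT0 pvBucket
  rw [PySem.Dict.getD_foldl_modify_append, PySem.Dict.getD_empty, List.nil_append]

theorem pvSet_update_self (s : List String) : PySem.Set.update s s = s := by
  rw [PySem.Set.update_eq_append_filter]
  have : List.filter (fun y => !PySem.Set.contains s y) (PySem.Set.ofList s) = [] := by
    rw [List.filter_eq_nil_iff]
    intro a ha
    have ha' : a ∈ s := (PySem.Set.mem_ofList _ _).mp ha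
    simp [ha']
  rw [this, List.append_nil]

theorem pvA_eq (histogram : List (String × List (String × Int))) :
    build_tier_list histogram = pvSpec (pvPairs histogram) := by
  have h0 : build_tier_list histogram = (pvT2 (pvPairs histogram)).items := by
    simp only [build_tier_list, pvT2, pvT1, pvT0, pvPairs]
    rw [pvA_fold]
  rw [h0]
  set ps := pvPairs histogram with hps
  -- keys of the bucket dict
  have hndK : (pvT0 ps).keys.Nodup := by rw [pvT0_keys]; exact PySem.Set.nodup_ofList _
  set SK := PySem.List.sorted (pvT0 ps).keys (fun k => k) false with hSK
  have hSKperm : SK.Perm (pvT0 ps).keys := PySem.List.sorted_perm _ _ _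
  have hndSK : SK.Nodup := (hSKperm.nodup_iff).mpr hndK
  -- the rebuilt dict with sorted keys
  have hItems1 : (pvT1 ps).items = SK.map (fun k => (k, (pvT0 ps).getD k [])) := by
    unfold pvT1
    rw [PySem.Dict.items_foldl_insert_fresh SK (fun k => k) (fun k => (pvT0 ps).getD k [])
      PySem.Dict.empty (fun a _ => PySem.Dict.contains_empty a) (by simpa using hndSK)]
    simp [PySem.Dict.empty]
  have hkeys1 : (pvT1 ps).keys = SK := by
    simp only [PySem.Dict.keys, hItems1, List.map_map]
    exact (List.map_congr_left (g := id) fun a _ => rfl).trans (List.map_id SK)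
  have hnd1 : (pvT1 ps).keys.Nodup := by rw [hkeys1]; exact hndSK
  have hG1 : ∀ k ∈ SK, (pvT1 ps).getD k [] = (pvT0 ps).getD k [] := by
    intro k hk
    exact PySem.Dict.getD_of_mem_items (pvT1 ps)
      (by rw [hItems1]; exact List.mem_map_of_mem hk) hnd1 []
  -- the final per-tier sorting pass
  have hkeys2 : (pvT2 ps).keys = (pvT1 ps).keys := by
    unfold pvT2
    rw [PySem.Dict.keys_foldl_modify (pvT1 ps).keys []
      (fun _ _ l => PySem.List.sorted l (fun x => x) false)]
    exact pvSet_update_self _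
  have hItems2 : (pvT2 ps).items = (pvT2 ps).keys.map (fun k => (k, (pvT2 ps).getD k [])) :=
    PySem.Dict.items_eq_map_keys _ (by rw [hkeys2]; exact hnd1) []
  rw [hItems2, hkeys2, hkeys1]
  unfold pvSpec
  rw [← pvT0_keys ps, ← hSK]
  apply List.map_congr_left
  intro k hk
  have hmem : k ∈ (pvT1 ps).keys := by rw [hkeys1]; exact hk
  have : (pvT2 ps).getD k [] = PySem.List.sorted ((pvT1 ps).getD k []) (fun x => x) false := by
    unfold pvT2
    rw [pvG_getD _ _ hnd1 k, if_pos hmem]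
  rw [this, hG1 k hk, pvT0_getD]

theorem pvLexLE_trans {a b c : String × String} (h1 : pvLexLE a b) (h2 : pvLexLE b c) :
    pvLexLE a c := by
  unfold pvLexLE at *
  rcases h1 with h1 | ⟨h1, h1'⟩ <;> rcases h2 with h2 | ⟨h2, h2'⟩
  · exact Or.inl (lt_trans h1 h2)
  · exact Or.inl (h2 ▸ h1)
  · exact Or.inl (h1 ▸ h2)
  · exact Or.inr ⟨h1.trans h2, le_trans h1' h2'⟩

theorem pvLexLT_true {a b : String × String} (h : pvLexLT a b = true) : pvLexLE a b := by
  unfold pvLexLT at h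
  unfold pvLexLE
  simp only [Bool.or_eq_true, Bool.and_eq_true, Bool.not_eq_true', decide_eq_true_eq,
    decide_eq_false_iff_not] at h
  rcases h with h | ⟨h1, h2⟩
  · exact Or.inl h
  · by_cases hab : a.1 < b.1
    · exact Or.inl hab
    · exact Or.inr ⟨le_antisymm (not_lt.mp h1) (not_lt.mp hab), le_of_lt h2⟩

theorem pvLexLT_false {a b : String × String} (h : pvLexLT a b = false) : pvLexLE b a := by
  unfold pvLexLT at h
  unfold pvLexLE
  simp only [Bool.or_eq_false_iff, Bool.and_eq_false_iff, Bool.not_eq_false', decide_eq_true_eq,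
    decide_eq_false_iff_not] at h
  obtain ⟨h1, h2⟩ := h
  rcases h2 with h2 | h2
  · exact Or.inl h2
  · by_cases hba : b.1 < a.1
    · exact Or.inl hba
    · exact Or.inr ⟨le_antisymm (not_lt.mp h1) (not_lt.mp hba), not_lt.mp h2⟩

theorem pvInsert_pairwise (x : String × String) (ys : List (String × String))
    (h : ys.Pairwise pvLexLE) : (PySem.List.insertBy pvLexLT x ys).Pairwise pvLexLE := by
  induction ys with
  | nil => simp [PySem.List.insertBy]
  | cons y ys ih =>
    obtain ⟨hy, hys⟩ := List.pairwise_cons.mp h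
    rw [show PySem.List.insertBy pvLexLT x (y :: ys)
        = if pvLexLT x y then x :: y :: ys else y :: PySem.List.insertBy pvLexLT x ys by
      simp [PySem.List.insertBy]]
    by_cases hlt : pvLexLT x y = true
    · rw [if_pos hlt]
      refine List.pairwise_cons.mpr ⟨?_, h⟩
      intro z hz
      rcases List.mem_cons.mp hz with rfl | hz
      · exact pvLexLT_true hlt
      · exact pvLexLE_trans (pvLexLT_true hlt) (hy z hz)
    · rw [if_neg hlt]
      refine List.pairwise_cons.mpr ⟨?_, ih hys⟩
      intro z hz
      rcases (PySem.List.insertBy_mem_iff _ _ _ _).mp hz with rfl | hz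
      · exact pvLexLT_false (Bool.not_eq_true _ ▸ eq_false_of_ne_true hlt)
      · exact hy z hz

theorem pvSorted2_pairwise (ps : List (String × String)) :
    (PySem.List.sorted2 ps (fun p => p.1) (fun p => p.2) false).Pairwise pvLexLE := by
  have main : ∀ (l : List (String × String)) (acc : List (String × String)),
      acc.Pairwise pvLexLE →
      (l.foldl (fun acc x => PySem.List.insertBy pvLexLT x acc) acc).Pairwise pvLexLE := by
    intro l
    induction l with
    | nil => intro acc h; exact h
    | cons x l ih =>
      intro acc h
      exact ih _ (pvInsert_pairwise x acc h)
  have hrfl : PySem.List.sorted2 ps (fun p => p.1) (fun p => p.2) false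
      = List.foldl (fun acc x => PySem.List.insertBy pvLexLT x acc) [] ps := rfl
  rw [hrfl]
  exact main ps [] List.Pairwise.nil

theorem pvDropWhile_head_false {α : Type} (p : α → Bool) (l : List α) (x : α) (xs : List α)
    (h : l.dropWhile p = x :: xs) : p x = false := by
  induction l with
  | nil => simp at h
  | cons a l ih =>
    rw [List.dropWhile_cons] at h
    by_cases hp : p a = true
    · rw [if_pos hp] at h; exact ih h
    · rw [if_neg hp] at h
      cases h
      simpa using hp

theorem pvDrop_gt (t : String) (l : String) (rest : List (String × String))
    (hs : ((t, l) :: rest).Pairwise pvLexLE) :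
    ∀ q ∈ rest.dropWhile (fun q => q.1 == t), t < q.1 := by
  obtain ⟨hhead, hrest⟩ := List.pairwise_cons.mp hs
  cases hd : rest.dropWhile (fun q => q.1 == t) with
  | nil => simp
  | cons q0 ds =>
    have hq0f : (q0.1 == t) = false :=
      pvDropWhile_head_false (fun q : String × String => q.1 == t) rest q0 ds hd
    have hq0ne : q0.1 ≠ t := by simpa using hq0f
    have hq0mem : q0 ∈ rest :=
      (List.dropWhile_sublist _).subset (hd ▸ List.mem_cons_self)
    have ht0 : t ≤ q0.1 := by
      rcases hhead q0 hq0mem with h | ⟨h, _⟩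
      · exact le_of_lt h
      · exact le_of_eq h
    have ht0' : t < q0.1 := lt_of_le_of_ne ht0 (Ne.symm hq0ne)
    have hdpw : (q0 :: ds).Pairwise pvLexLE :=
      hd ▸ List.Pairwise.sublist (List.dropWhile_sublist _) hrest
    intro q hq
    rcases List.mem_cons.mp hq with rfl | hq
    · exact ht0'
    · rcases (List.pairwise_cons.mp hdpw).1 q hq with h | ⟨h, _⟩
      · exact lt_trans ht0' h
      · exact h ▸ ht0'

theorem pvGroups_spec (s : List (String × String)) (hs : s.Pairwise pvLexLE) :
    (∀ g ∈ pvGroupRuns s, g.2 = pvBucket g.1 s) ∧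
    ((pvGroupRuns s).map (fun g => g.1)).Pairwise (· < ·) ∧
    (∀ x, x ∈ (pvGroupRuns s).map (fun g => g.1) ↔ x ∈ s.map (fun p => p.1)) := by
  induction s using pvGroupRuns.induct with
  | case1 => simp [pvGroupRuns]
  | case2 t l rest ih =>
    obtain ⟨hhead, hrest⟩ := List.pairwise_cons.mp hs
    have hdrop_pw : (rest.dropWhile (fun q => q.1 == t)).Pairwise pvLexLE :=
      List.Pairwise.sublist (List.dropWhile_sublist _) hrest
    obtain ⟨ihB, ihP, ihM⟩ := ih hdrop_pw
    have hgt : ∀ q ∈ rest.dropWhile (fun q => q.1 == t), t < q.1 := pvDrop_gt t l rest hs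
    have htake : ∀ q ∈ rest.takeWhile (fun q => q.1 == t), q.1 = t := fun q hq => by
      simpa using List.mem_takeWhile_imp hq
    have hsplit : rest.takeWhile (fun q => q.1 == t) ++ rest.dropWhile (fun q => q.1 == t)
        = rest := List.takeWhile_append_dropWhile
    -- the filtered occurrences of any tier x in the whole list
    have hfilter : ∀ x : String, ((t, l) :: rest).filter (fun p => p.1 == x)
        = (if t = x then (t, l) :: rest.takeWhile (fun q => q.1 == t) else [])
          ++ (rest.dropWhile (fun q => q.1 == t)).filter (fun p => p.1 == x) := by
      intro x
      rw [List.filter_cons, ← hsplit, List.filter_append]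
      by_cases htx : t = x
      · subst htx
        rw [if_pos (by simp)]
        rw [if_pos rfl]
        have : (rest.takeWhile (fun q => q.1 == t)).filter (fun p => p.1 == t)
            = rest.takeWhile (fun q => q.1 == t) :=
          List.filter_eq_self.mpr (fun a ha => by simp [htake a ha])
        rw [this]
        simp [hsplit]
      · rw [if_neg (by simpa using htx)]
        rw [if_neg htx]
        have : (rest.takeWhile (fun q => q.1 == t)).filter (fun p => p.1 == x) = [] :=
          List.filter_eq_nil_iff.mpr (fun a ha => by simp [htake a ha, htx])
        rw [this]
        simp [hsplit]
    have hgroups : pvGroupRuns ((t, l) :: rest)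
        = (t, l :: (rest.takeWhile (fun q => q.1 == t)).map (fun q => q.2))
          :: pvGroupRuns (rest.dropWhile (fun q => q.1 == t)) := by
      simp [pvGroupRuns]
    refine ⟨?_, ?_, ?_⟩
    · intro g hg
      rw [hgroups] at hg
      rcases List.mem_cons.mp hg with rfl | hg
      · unfold pvBucket
        rw [hfilter t, if_pos rfl]
        have : (rest.dropWhile (fun q => q.1 == t)).filter (fun p => p.1 == t) = [] :=
          List.filter_eq_nil_iff.mpr (fun a ha => by simp [ne_of_gt (hgt a ha)])
        rw [this, List.append_nil]
        simp
      · have hmemfst : g.1 ∈ (rest.dropWhile (fun q => q.1 == t)).map (fun p => p.1) :=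
          (ihM g.1).mp (List.mem_map_of_mem hg)
        have hgt' : t < g.1 := by
          obtain ⟨q, hq, hq'⟩ := List.mem_map.mp hmemfst
          exact hq' ▸ hgt q hq
        have : pvBucket g.1 ((t, l) :: rest)
            = pvBucket g.1 (rest.dropWhile (fun q => q.1 == t)) := by
          unfold pvBucket
          rw [hfilter g.1, if_neg (ne_of_lt hgt'), List.nil_append]
        rw [this]
        exact ihB g hg
    · rw [hgroups]
      simp only [List.map_cons]
      refine List.pairwise_cons.mpr ⟨?_, ihP⟩
      intro x hx
      obtain ⟨q, hq, rfl⟩ := by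
        have := (ihM x).mp hx
        exact List.mem_map.mp this
      exact hgt q hq
    · intro x
      rw [hgroups]
      simp only [List.map_cons, List.mem_cons]
      constructor
      · rintro (rfl | hx)
        · exact Or.inl rfl
        · right
          have : x ∈ (rest.dropWhile (fun q => q.1 == t)).map (fun p => p.1) := (ihM x).mp hx
          obtain ⟨q, hq, rfl⟩ := List.mem_map.mp this
          exact List.mem_map_of_mem ((List.dropWhile_sublist _).subset hq)
      · rintro (rfl | hx)
        · exact Or.inl rfl
        · obtain ⟨q, hq, rfl⟩ := List.mem_map.mp hx
          rw [← hsplit] at hq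
          rcases List.mem_append.mp hq with hq | hq
          · exact Or.inl (htake q hq)
          · exact Or.inr ((ihM q.1).mpr (List.mem_map_of_mem hq))

theorem pvBucket_sorted_eq (ps : List (String × String)) (t : String) :
    pvBucket t (PySem.List.sorted2 ps (fun p => p.1) (fun p => p.2) false)
      = PySem.List.sorted (pvBucket t ps) (fun x => x) false := by
  set s := PySem.List.sorted2 ps (fun p => p.1) (fun p => p.2) false with hsdef
  have hperm : s.Perm ps := PySem.List.sorted2_perm ps _ _ false
  have h1 : (pvBucket t s).Perm (pvBucket t ps) := (hperm.filter _).map _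
  have h2 : (pvBucket t s).Pairwise (· ≤ ·) := by
    unfold pvBucket
    rw [List.pairwise_map]
    refine List.Pairwise.imp_of_mem ?_ ((pvSorted2_pairwise ps).filter _)
    intro a b ha hb hab
    have ha' : a.1 = t := by simpa using (List.mem_filter.mp ha).2
    have hb' : b.1 = t := by simpa using (List.mem_filter.mp hb).2
    rcases hab with h | ⟨_, h⟩
    · rw [ha', hb'] at h
      exact absurd h (lt_irrefl t)
    · exact h
  have h3 : (PySem.List.sorted (pvBucket t ps) (fun x => x) false).Pairwise (· ≤ ·) :=
    PySem.List.sorted_pairwise (pvBucket t ps) (fun x => x)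
  have hperm2 : (pvBucket t s).Perm (PySem.List.sorted (pvBucket t ps) (fun x => x) false) :=
    h1.trans (PySem.List.sorted_perm _ _ _).symm
  exact List.Perm.eq_of_pairwise (fun a b _ _ hab hba => le_antisymm hab hba) h2 h3 hperm2

theorem pvB_eq (histogram : List (String × List (String × Int))) :
    build_tier_list_alt histogram = pvSpec (pvPairs histogram) := by
  have hpairs : (pvDictDecode histogram).items.foldl (fun acc hhv =>
      match PySem.List.sorted (pvDictDecode hhv.2).items (fun kv => kv.2) true with
      | [] => acc
      | top :: _ => acc ++ [(top.1, hhv.1 ++ " (" ++ PySem.Int.toStr top.2 ++ ")")]) []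
      = pvPairs histogram := by
    rw [PySem.List.foldl_congr_mem _ _ (fun acc hhv => acc ++ pvPairFn hhv) []
      (by
        intro acc x _
        unfold pvPairFn
        cases h : PySem.List.sorted (pvDictDecode x.2).items (fun kv => kv.2) true with
        | nil => simp [h]
        | cons top tl => simp [h])]
    rw [PySem.List.foldl_append_eq_flatMap, List.nil_append]
    rfl
  simp only [build_tier_list_alt]
  rw [hpairs]
  set ps := pvPairs histogram with hpsdef
  set s := PySem.List.sorted2 ps (fun p => p.1) (fun p => p.2) false with hsdef
  have hs : s.Pairwise pvLexLE := pvSorted2_pairwise ps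
  obtain ⟨hB, hP, hM⟩ := pvGroups_spec s hs
  have hperm : s.Perm ps := PySem.List.sorted2_perm ps _ _ false
  have hnodup : ((pvGroupRuns s).map (fun g => g.1)).Nodup :=
    hP.imp (fun h => ne_of_lt h)
  have hkeys : PySem.List.sorted (PySem.Set.ofList (ps.map (fun p => p.1))) (fun t => t) false
      = (pvGroupRuns s).map (fun g => g.1) := by
    apply PySem.List.sorted_eq_of_perm_of_pairwise_lt
    · rw [List.perm_ext_iff_of_nodup hnodup (PySem.Set.nodup_ofList _)]
      intro a
      rw [hM, PySem.Set.mem_ofList, (hperm.map (fun p => p.1)).mem_iff]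
    · exact hP
  unfold pvSpec
  rw [hkeys, List.map_map]
  have : ∀ g ∈ pvGroupRuns s,
      ((fun t => (t, PySem.List.sorted (pvBucket t ps) (fun x => x) false)) ∘ fun g => g.1) g
        = g := by
    intro g hg
    have h2 : g.2 = pvBucket g.1 s := hB g hg
    have h3 : pvBucket g.1 s = PySem.List.sorted (pvBucket g.1 ps) (fun x => x) false :=
      pvBucket_sorted_eq ps g.1
    simp only [Function.comp_apply]
    rw [← h3, ← h2]
  calc pvGroupRuns s = (pvGroupRuns s).map (fun g => g) := by simp
    _ = _ := List.map_congr_left (fun g hg => (this g hg).symm)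

-- ===== VERDICT (by name: the statement is the Claim_ definition above) =====
theorem build_tier_list_spec : Claim_equal_build_tier_list := by
  intro histogram _ _
  unfold Spec_build_tier_list
  rw [pvA_eq, pvB_eq]
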